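-- pv_equiv track=rewrite | github.com/wew226/agents | 2_openai/community_contributions/code_reviewer/tools/report_tools.py | _bug_section
-- ===== SOURCE A (Python) =====
-- def _bug_section(bugs: list) -> str:
--     if not bugs:
--         return "## 2. Bug Findings\n\n✅ No bugs were found."
--
--     severity_order = ["CRITICAL", "HIGH", "MEDIUM", "LOW"]
--     lines = ["## 2. Bug Findings\n"]
--
--     for severity in severity_order:
--         group = [b for b in bugs if b.get("severity") == severity]
--         if not group:
--             continue
--         lines.append(f"### {severity} ({len(group)})\n")
--         for bug in group:
--             lines.append(
--                 f"**File:** `{bug.get('file_path', 'N/A')}` — "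
--                 f"**Line:** `{bug.get('line_number', 'N/A')}`\n\n"
--                 f"**Category:** {bug.get('category', 'N/A')}\n\n"
--                 f"**Description:** {bug.get('description', 'N/A')}\n\n"
--                 f"**Suggestion:** {bug.get('suggestion', 'N/A')}\n"
--             )
--
--     return "\n".join(lines)
-- ===== SOURCE B (Python) =====
-- def _bug_section(bugs: list) -> str:
--     if not bugs:
--         return "## 2. Bug Findings\n\n✅ No bugs were found."
--
--     groups = {}
--     for b in bugs:
--         groups.setdefault(b.get("severity"), []).append(b)
--
--     lines = ["## 2. Bug Findings\n"]
--     for severity in ["CRITICAL", "HIGH", "MEDIUM", "LOW"]: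
--         group = groups.get(severity, [])
--         if group:
--             lines.append(f"### {severity} ({len(group)})\n")
--             lines.extend(
--                 f"**File:** `{bug.get('file_path', 'N/A')}` — "
--                 f"**Line:** `{bug.get('line_number', 'N/A')}`\n\n"
--                 f"**Category:** {bug.get('category', 'N/A')}\n\n"
--                 f"**Description:** {bug.get('description', 'N/A')}\n\n"
--                 f"**Suggestion:** {bug.get('suggestion', 'N/A')}\n"
--                 for bug in group
--             )
--     return "\n".join(lines)
-- ===== Notes on version B (the rewrite author's own statement) =====
-- stated objective: alternative
-- what changed: B replaces A's four full scans of bugs (one filter pass per severity) by a single grouping pass into a dict keyed by severity, then emits sections by looking each severity up once.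
import Mathlib
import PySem

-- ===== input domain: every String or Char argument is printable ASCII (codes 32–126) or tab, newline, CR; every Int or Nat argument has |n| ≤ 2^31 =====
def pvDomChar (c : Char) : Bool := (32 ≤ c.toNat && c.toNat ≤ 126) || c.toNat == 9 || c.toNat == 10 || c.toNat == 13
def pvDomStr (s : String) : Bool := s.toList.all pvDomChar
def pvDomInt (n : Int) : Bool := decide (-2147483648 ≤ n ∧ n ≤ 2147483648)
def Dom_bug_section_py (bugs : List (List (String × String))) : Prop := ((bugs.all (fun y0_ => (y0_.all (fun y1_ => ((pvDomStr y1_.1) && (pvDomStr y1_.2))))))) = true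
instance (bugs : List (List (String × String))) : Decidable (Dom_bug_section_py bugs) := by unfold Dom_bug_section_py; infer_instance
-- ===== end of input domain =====

-- B groups bugs by severity in one pass over the list instead of A's four filter scans (objective: alternative).

-- ===== PORT A =====
-- the per-bug f-string block (the identical f-string appears in A and in B; shared helper)
def pvBlock (bug : List (String × String)) : String :=
  "**File:** `" ++ (PySem.Dict.mk bug).getD "file_path" "N/A" ++ "` — " ++
  "**Line:** `" ++ (PySem.Dict.mk bug).getD "line_number" "N/A" ++ "`\n\n" ++
  "**Category:** " ++ (PySem.Dict.mk bug).getD "category" "N/A" ++ "\n\n" ++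
  "**Description:** " ++ (PySem.Dict.mk bug).getD "description" "N/A" ++ "\n\n" ++
  "**Suggestion:** " ++ (PySem.Dict.mk bug).getD "suggestion" "N/A" ++ "\n"

def bug_section_py (bugs : List (List (String × String))) : String :=
  if bugs.isEmpty then "## 2. Bug Findings\n\n✅ No bugs were found."
  else
    let severity_order := ["CRITICAL", "HIGH", "MEDIUM", "LOW"]
    let lines := severity_order.foldl (fun lines severity =>
      let group := bugs.filter (fun b => (PySem.Dict.mk b).get? "severity" == some severity)
      if group.isEmpty then lines
      else
        group.foldl (fun ls bug => ls ++ [pvBlock bug])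
          (lines ++ ["### " ++ severity ++ " (" ++ PySem.Int.toStr (group.length : Int) ++ ")\n"]))
      ["## 2. Bug Findings\n"]
    PySem.Str.join "\n" lines

-- ===== PORT B =====
def bug_section_py_alt (bugs : List (List (String × String))) : String :=
  if bugs.isEmpty then "## 2. Bug Findings\n\n✅ No bugs were found."
  else
    -- groups.setdefault(b.get("severity"), []).append(b)  ==  modify key [] (· ++ [b])
    let groups : PySem.Dict (Option String) (List (List (String × String))) :=
      bugs.foldl (fun g b => g.modify ((PySem.Dict.mk b).get? "severity") [] (· ++ [b]))
        PySem.Dict.empty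
    let lines := ["CRITICAL", "HIGH", "MEDIUM", "LOW"].foldl (fun lines severity =>
      let group := groups.getD (some severity) []
      if group.isEmpty then lines
      else
        (lines ++ ["### " ++ severity ++ " (" ++ PySem.Int.toStr (group.length : Int) ++ ")\n"])
          ++ group.map pvBlock)
      ["## 2. Bug Findings\n"]
    PySem.Str.join "\n" lines

-- ===== PRECONDITION & SPEC =====
def Spec_bug_section_py (bugs : List (List (String × String))) (out : String) : Prop := out = bug_section_py_alt bugs
instance (bugs : List (List (String × String))) (out : String) : Decidable (Spec_bug_section_py bugs out) := by unfold Spec_bug_section_py; infer_instance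

-- ===== CLAIM (what is proved, stated in full; the proofs are below) =====
def Claim_equal_bug_section_py : Prop := ∀ (bugs : List (List (String × String))), Dom_bug_section_py bugs → Spec_bug_section_py bugs (bug_section_py bugs)

-- ===== LEMMAS AND PROOFS =====

-- B's grouping dict looked up at a severity is exactly A's filter of bugs at that severity.
theorem pv_group_eq (bugs : List (List (String × String))) (sev : String) :
    (bugs.foldl (fun g b => g.modify ((PySem.Dict.mk b).get? "severity") [] (· ++ [b]))
        (PySem.Dict.empty : PySem.Dict (Option String) (List (List (String × String))))).getD (some sev) []
      = bugs.filter (fun b => (PySem.Dict.mk b).get? "severity" == some sev) := by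
  have h := PySem.Dict.getD_foldl_modify_append
      (l := bugs.map (fun b => ((PySem.Dict.mk b).get? "severity", b)))
      (d := (PySem.Dict.empty : PySem.Dict (Option String) (List (List (String × String)))))
      (c := some sev)
  rw [List.foldl_map] at h
  simpa [List.filter_map, Function.comp_def, List.map_map] using h

theorem pv_blocks_eq (g : List (List (String × String))) (init : List String) :
    g.foldl (fun ls bug => ls ++ [pvBlock bug]) init = init ++ g.map pvBlock :=
  PySem.List.foldl_append_singleton_eq_map ..

-- ===== VERDICT (by name: the statement is the Claim_ definition above) =====
theorem bug_section_py_spec : Claim_equal_bug_section_py := by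
  intro bugs _
  unfold Spec_bug_section_py bug_section_py bug_section_py_alt
  by_cases h : bugs.isEmpty
  · simp [h]
  · simp only [h, if_neg, Bool.false_eq_true, not_false_iff]
    congr 1
    simp only [List.foldl, pv_group_eq, pv_blocks_eq]
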